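-- pv_equiv track=rewrite | github.com/aryanbuzz9/DSA_in_Python_with_The_Aryan | Dynamic_Programming/Power Of Three.py | rec
-- ===== SOURCE A (Python) =====
-- def rec(n):
--     if(n==3):
--         return 3
--     if(n==0):
--         return 1
--     if(n==1):
--         return 3
--     return 3*rec(n//3)
-- ===== SOURCE B (Python) =====
-- def rec(n):
--     result = 1
--     while n not in (0, 1, 3):
--         result *= 3
--         n //= 3
--     return result if n == 0 else result * 3
-- ===== Notes on version B (the rewrite author's own statement) =====
-- stated objective: alternative
-- what changed: Replaced the recursion by an iterative while-loop with a running product accumulator: result is multiplied by 3 at each division step and the three base cases collapse into a single post-loop test.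
import Mathlib
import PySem

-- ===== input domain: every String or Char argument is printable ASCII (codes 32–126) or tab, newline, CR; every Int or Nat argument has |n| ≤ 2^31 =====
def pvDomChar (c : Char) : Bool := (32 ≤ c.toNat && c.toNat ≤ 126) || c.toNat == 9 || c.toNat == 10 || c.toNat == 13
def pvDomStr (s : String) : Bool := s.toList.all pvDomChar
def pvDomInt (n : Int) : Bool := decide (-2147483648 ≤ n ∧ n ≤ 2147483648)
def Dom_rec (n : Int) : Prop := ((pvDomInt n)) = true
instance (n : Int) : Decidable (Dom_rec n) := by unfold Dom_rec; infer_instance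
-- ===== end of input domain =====

-- B rewrites A's tail recursion as an explicit iterative loop with a product accumulator (objective: alternative decomposition, same cost).

-- ===== PORT A =====
-- A's recursion, driven by a fuel argument large enough on all n ≥ 0 (negative n makes Python A recurse forever / RecursionError; excluded by Pre_rec).
def recFuel : Nat → Int → Int
  | 0, _ => 0
  | f + 1, n =>
    if n = 3 then 3
    else if n = 0 then 1
    else if n = 1 then 3
    else 3 * recFuel f (PySem.Int.floordiv n 3)

def rec (n : Int) : Int := recFuel (n.toNat + 1) n

-- ===== PORT B =====
-- the while-loop of Source B: state (n, result), fuel as above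
def recLoop : Nat → Int → Int → Int
  | 0, n, result => if n = 0 then result else result * 3
  | f + 1, n, result =>
    if n = 0 ∨ n = 1 ∨ n = 3 then (if n = 0 then result else result * 3)
    else recLoop f (PySem.Int.floordiv n 3) (result * 3)

def rec_alt (n : Int) : Int := recLoop (n.toNat + 1) n 1

-- ===== PRECONDITION & SPEC =====
-- Pre_rec excludes negative n, on which Python A exceeds the recursion limit (RecursionError) and B loops forever.
def Pre_rec (n : Int) : Prop := 0 ≤ n
instance (n : Int) : Decidable (Pre_rec n) := by unfold Pre_rec; infer_instance
def pvWitness_rec : Int := 12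
def Spec_rec (n : Int) (out : Int) : Prop := out = rec_alt n
instance (n : Int) (out : Int) : Decidable (Spec_rec n out) := by unfold Spec_rec; infer_instance

-- ===== CLAIM (what is proved, stated in full; the proofs are below) =====
def Claim_equal_rec : Prop := ∀ (n : Int), Dom_rec n → Pre_rec n → Spec_rec n (rec n)

-- ===== LEMMAS AND PROOFS =====

theorem floordiv3_nonneg {n : Int} (h : 0 ≤ n) : 0 ≤ PySem.Int.floordiv n 3 := by
  rw [PySem.Int.floordiv_eq_ediv_of_pos (by omega)]; omega

theorem floordiv3_lt {n : Int} (h : 1 ≤ n) : PySem.Int.floordiv n 3 < n := by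
  rw [PySem.Int.floordiv_eq_ediv_of_pos (by omega)]; omega

-- recFuel is fuel-insensitive once the fuel exceeds n
theorem recFuel_fuel {f g : Nat} {n : Int} (hn : 0 ≤ n) (hf : n < f) (hg : n < g) :
    recFuel f n = recFuel g n := by
  induction f using Nat.strong_induction_on generalizing g n with
  | _ f ih =>
    obtain ⟨f', rfl⟩ : ∃ f', f = f' + 1 := ⟨f - 1, by omega⟩
    obtain ⟨g', rfl⟩ : ∃ g', g = g' + 1 := ⟨g - 1, by omega⟩
    simp only [recFuel]
    split_ifs with h3 h0 h1
    · rfl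
    · rfl
    · rfl
    · have hd0 : 0 ≤ PySem.Int.floordiv n 3 := floordiv3_nonneg hn
      have hdlt : PySem.Int.floordiv n 3 < n := floordiv3_lt (by omega)
      have key : recFuel f' (PySem.Int.floordiv n 3) = recFuel g' (PySem.Int.floordiv n 3) :=
        ih f' (by omega) hd0 (by omega) (by omega)
      rw [key]

theorem rec_unfold {n : Int} (hn : 0 ≤ n) :
    rec n = if n = 3 then 3 else if n = 0 then 1 else if n = 1 then 3
            else 3 * rec (PySem.Int.floordiv n 3) := by
  show recFuel (n.toNat + 1) n = _
  rw [recFuel]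
  split_ifs with h3 h0 h1
  · rfl
  · rfl
  · rfl
  · have hd0 : 0 ≤ PySem.Int.floordiv n 3 := floordiv3_nonneg hn
    have hdlt : PySem.Int.floordiv n 3 < n := floordiv3_lt (by omega)
    show 3 * recFuel n.toNat _ = 3 * recFuel ((PySem.Int.floordiv n 3).toNat + 1) _
    have key : recFuel n.toNat (PySem.Int.floordiv n 3)
        = recFuel ((PySem.Int.floordiv n 3).toNat + 1) (PySem.Int.floordiv n 3) :=
      recFuel_fuel hd0 (by omega) (by omega)
    rw [key]

-- loop invariant: with enough fuel, recLoop f n r computes r * rec n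
theorem recLoop_inv {f : Nat} {n r : Int} (hn : 0 ≤ n) (hf : n ≤ f) :
    recLoop f n r = r * rec n := by
  induction f using Nat.strong_induction_on generalizing n r with
  | _ f ih =>
    by_cases hb : n = 0 ∨ n = 1 ∨ n = 3
    · rcases hb with rfl | rfl | rfl
      · cases f <;> simp [recLoop, show rec 0 = 1 by decide]
      · obtain ⟨f', rfl⟩ : ∃ f', f = f' + 1 := ⟨f - 1, by omega⟩
        simp [recLoop, show rec 1 = 3 by decide]
      · obtain ⟨f', rfl⟩ : ∃ f', f = f' + 1 := ⟨f - 1, by omega⟩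
        simp [recLoop, show rec 3 = 3 by decide]
    · push Not at hb
      obtain ⟨h0, h1, h3⟩ := hb
      obtain ⟨f', rfl⟩ : ∃ f', f = f' + 1 := ⟨f - 1, by omega⟩
      have hd0 : 0 ≤ PySem.Int.floordiv n 3 := floordiv3_nonneg hn
      have hdlt : PySem.Int.floordiv n 3 < n := floordiv3_lt (by omega)
      rw [recLoop, if_neg (by tauto),
          ih f' (by omega) hd0 (by omega),
          rec_unfold hn, if_neg h3, if_neg h0, if_neg h1]
      ring

-- ===== VERDICT (by name: the statement is the Claim_ definition above) =====
theorem rec_spec : Claim_equal_rec := by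
  intro n _ hpre
  show rec n = rec_alt n
  rw [rec_alt, recLoop_inv hpre (by omega), one_mul]
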